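-- pv_equiv track=rewrite | github.com/Annusha/viterbi | example.py | count
-- ===== SOURCE A (Python) =====
-- def count(alignment, transcript):
--     result = []
--     for state in transcript:
--         c = 0
--         try:
--             while alignment[0] == state:
--                 c += 1
--                 alignment = alignment[1:]
--         except IndexError:
--             pass
--         result.append((state, c))
--     return result
-- ===== SOURCE B (Python) =====
-- def count(alignment, transcript):
--     # Run-length encode the alignment once (two-pointer scan), then
--     # consume the run table in a single pass over the transcript.
--     runs = []
--     i = 0
--     n = len(alignment)
--     while i < n:
--         j = i
--         while j < n and alignment[j] == alignment[i]:
--             j += 1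
--         runs.append((alignment[i], j - i))
--         i = j
--     out = []
--     for state in transcript:
--         if runs and runs[0][0] == state:
--             out.append((state, runs[0][1]))
--             runs = runs[1:]
--         else:
--             out.append((state, 0))
--     return out
-- ===== Notes on version B (the rewrite author's own statement) =====
-- stated objective: alternative
-- what changed: B run-length encodes the alignment once and then does a single pass over the transcript consuming the run table, instead of A's repeated leading-scan-and-reslice of the alignment per transcript state.
import Mathlib
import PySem

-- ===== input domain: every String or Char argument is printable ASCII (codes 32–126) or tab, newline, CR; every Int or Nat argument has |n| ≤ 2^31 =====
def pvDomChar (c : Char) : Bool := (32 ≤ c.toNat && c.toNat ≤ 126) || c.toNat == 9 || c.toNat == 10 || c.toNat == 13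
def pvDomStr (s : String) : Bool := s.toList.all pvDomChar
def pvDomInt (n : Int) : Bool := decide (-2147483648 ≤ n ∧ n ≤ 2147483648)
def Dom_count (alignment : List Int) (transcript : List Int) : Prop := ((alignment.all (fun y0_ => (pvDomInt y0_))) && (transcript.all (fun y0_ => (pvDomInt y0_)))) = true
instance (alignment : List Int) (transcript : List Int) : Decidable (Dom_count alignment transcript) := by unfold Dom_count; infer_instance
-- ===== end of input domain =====

-- B run-length encodes the alignment once and consumes the run table in one transcript pass,
-- instead of A's repeated leading-scan-and-reslice per transcript state (alternative algorithm).


-- ===== PORT A =====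
-- the try/while: count leading elements equal to s, re-slicing alignment each step;
-- IndexError on the empty list ends the loop (caught by 'except: pass')
def countStrip : List Int → Int → Int × List Int
  | [], _ => (0, [])
  | x :: rest, s =>
      if x = s then
        let p := countStrip rest s
        (p.1 + 1, p.2)
      else (0, x :: rest)

def count (alignment : List Int) (transcript : List Int) : List (Int × Int) :=
  match transcript with
  | [] => []
  | s :: ts =>
      let p := countStrip alignment s
      (s, p.1) :: count p.2 ts

-- ===== PORT B =====
-- inner while of the run-length pass: length of the leading run of v in xs
def runLen : List Int → Int → Nat
  | [], _ => 0
  | x :: rest, v => if x = v then runLen rest v + 1 else 0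

-- outer while: run-length encode the alignment (two-pointer scan, j - i = runLen xs x + 1)
def groupRuns : List Int → List (Int × Int)
  | [] => []
  | x :: xs => (x, (runLen xs x : Int) + 1) :: groupRuns (xs.drop (runLen xs x))
termination_by a => a.length
decreasing_by simp

-- the for-loop over transcript consuming the run table
def emitLoop : List (Int × Int) → List Int → List (Int × Int)
  | _, [] => []
  | [], s :: ts => (s, 0) :: emitLoop [] ts
  | (v, c) :: rest, s :: ts =>
      if v = s then (s, c) :: emitLoop rest ts
      else (s, 0) :: emitLoop ((v, c) :: rest) ts

def count_alt (alignment : List Int) (transcript : List Int) : List (Int × Int) :=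
  emitLoop (groupRuns alignment) transcript

-- ===== PRECONDITION & SPEC =====
def Spec_count (alignment : List Int) (transcript : List Int) (out : List (Int × Int)) : Prop := out = count_alt alignment transcript
instance (alignment : List Int) (transcript : List Int) (out : List (Int × Int)) : Decidable (Spec_count alignment transcript out) := by unfold Spec_count; infer_instance

-- ===== CLAIM (what is proved, stated in full; the proofs are below) =====
def Claim_equal_count : Prop := ∀ (alignment : List Int) (transcript : List Int), Dom_count alignment transcript → Spec_count alignment transcript (count alignment transcript)

-- ===== LEMMAS AND PROOFS =====

-- A's stripping loop computes exactly (leading-run length, remainder)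
theorem countStrip_eq (xs : List Int) (s : Int) :
    countStrip xs s = ((runLen xs s : Int), xs.drop (runLen xs s)) := by
  induction xs with
  | nil => simp [countStrip, runLen]
  | cons x rest ih =>
      by_cases h : x = s
      · simp [countStrip, runLen, h, ih]
      · simp [countStrip, runLen, h]

theorem groupRuns_nil : groupRuns [] = [] := by rw [groupRuns]

theorem groupRuns_cons (x : Int) (xs : List Int) :
    groupRuns (x :: xs) = (x, (runLen xs x : Int) + 1) :: groupRuns (xs.drop (runLen xs x)) := by
  rw [groupRuns]

theorem count_eq_emit (ts : List Int) : ∀ a : List Int,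
    count a ts = emitLoop (groupRuns a) ts := by
  induction ts with
  | nil => intro a; cases a <;> simp [emitLoop, count]
  | cons s ts ih =>
      intro a
      cases a with
      | nil => rw [groupRuns_nil]; simp [count, countStrip, emitLoop, ← groupRuns_nil, ih]
      | cons x xs =>
          by_cases h : x = s
          · subst h
            rw [groupRuns_cons]
            simp [count, countStrip_eq, emitLoop, runLen, ih]
          · simp [count, countStrip, h]
            rw [groupRuns_cons]
            simp [emitLoop, h]
            rw [← groupRuns_cons]
            exact ih _

-- ===== VERDICT (by name: the statement is the Claim_ definition above) =====
theorem count_spec : Claim_equal_count := by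
  intro a t _
  unfold Spec_count count_alt
  exact count_eq_emit t a
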